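-- pv_equiv track=rewrite | github.com/dimilka/algoritms_2 | multipule_hash.py | key_compiling
-- ===== SOURCE A (Python) =====
-- def key_compiling(word):
--     key = 0
--     for i, val in enumerate(word):
--         letter_ord = ord(val)
--         if i % 2 == 0:
--             letter_ord **= 2
--         else:
--             letter_ord **= 3
--         key += letter_ord
--     return key
-- ===== SOURCE B (Python) =====
-- def key_compiling(word):
--     total = 0
--     n = len(word)
--     j = 0
--     while j + 1 < n:
--         total += ord(word[j]) ** 2 + ord(word[j + 1]) ** 3
--         j += 2
--     if j < n:
--         total += ord(word[j]) ** 2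
--     return total
-- ===== Notes on version B (the rewrite author's own statement) =====
-- stated objective: alternative
-- what changed: Replaces the enumerate loop with a per-index parity branch by a pairwise loop that consumes two characters per iteration (square the first, cube the second), with a trailing single-element step; no index-parity test remains.
import Mathlib
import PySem

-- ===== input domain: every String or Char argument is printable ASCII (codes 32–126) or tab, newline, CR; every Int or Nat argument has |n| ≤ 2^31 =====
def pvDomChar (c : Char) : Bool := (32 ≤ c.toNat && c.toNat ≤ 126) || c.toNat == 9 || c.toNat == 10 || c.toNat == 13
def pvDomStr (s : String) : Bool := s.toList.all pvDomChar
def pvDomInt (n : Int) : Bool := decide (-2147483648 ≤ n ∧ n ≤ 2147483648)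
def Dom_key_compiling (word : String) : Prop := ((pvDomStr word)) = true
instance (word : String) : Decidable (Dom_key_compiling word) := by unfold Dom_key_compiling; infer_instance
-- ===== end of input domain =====

-- B replaces A's parity branch inside one enumerate loop by a pairwise loop eating two
-- characters per step (square, cube), plus a trailing single-character step; return value only.

-- ===== PORT A =====
-- for i, val in enumerate(word): key += ord(val)**2 if i even else ord(val)**3
def key_compiling (word : String) : Int :=
  (PySem.List.enumerate word.toList 0).foldl
    (fun key iv =>
      let letter_ord : Int := (iv.2.toNat : Int)
      let letter_ord := if PySem.Int.mod iv.1 2 = 0 then letter_ord ^ 2 else letter_ord ^ 3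
      key + letter_ord) 0

-- ===== PORT B =====
-- Source B's while loop: state (j, total); the remaining suffix word[j:] is carried as the list,
-- 'j + 1 < n' = two characters remain, the trailing 'if j < n' = one character remains.
def kcLoop : List Char → Int → Int
  | a :: b :: rest, total => kcLoop rest (total + ((a.toNat : Int) ^ 2 + (b.toNat : Int) ^ 3))
  | [a], total => total + (a.toNat : Int) ^ 2
  | [], total => total

def key_compiling_alt (word : String) : Int := kcLoop word.toList 0

-- ===== PRECONDITION & SPEC =====
def Spec_key_compiling (word : String) (out : Int) : Prop := out = key_compiling_alt word
instance (word : String) (out : Int) : Decidable (Spec_key_compiling word out) := by unfold Spec_key_compiling; infer_instance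

-- ===== CLAIM (what is proved, stated in full; the proofs are below) =====
def Claim_equal_key_compiling : Prop := ∀ (word : String), Dom_key_compiling word → Spec_key_compiling word (key_compiling word)

-- ===== LEMMAS AND PROOFS =====
lemma mod_two_even (s : Int) (h : s % 2 = 0) : PySem.Int.mod s 2 = 0 := by
  simp [PySem.Int.mod, Int.fmod_eq_emod]; omega

lemma mod_two_odd (s : Int) (h : s % 2 = 0) : ¬ PySem.Int.mod (s + 1) 2 = 0 := by
  simp [PySem.Int.mod, Int.fmod_eq_emod]; omega

lemma foldl_enumerate_eq_kcLoop (cs : List Char) (s acc : Int) (hs : s % 2 = 0) :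
    (PySem.List.enumerate cs s).foldl
      (fun key iv =>
        let letter_ord : Int := (iv.2.toNat : Int)
        let letter_ord := if PySem.Int.mod iv.1 2 = 0 then letter_ord ^ 2 else letter_ord ^ 3
        key + letter_ord) acc = kcLoop cs acc := by
  induction cs, acc using kcLoop.induct generalizing s with
  | case1 a b rest total ih =>
      simp only [PySem.List.enumerate_cons, List.foldl_cons, kcLoop,
        mod_two_even s hs, if_true, mod_two_odd s hs, if_false]
      simpa [add_assoc] using ih (s + 1 + 1) (by omega)
  | case2 a total =>
      simp [PySem.List.enumerate_cons, PySem.List.enumerate_nil, kcLoop]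
      omega
  | case3 total =>
      simp [PySem.List.enumerate_nil, kcLoop]

-- ===== VERDICT (by name: the statement is the Claim_ definition above) =====
theorem key_compiling_spec : Claim_equal_key_compiling := by
  intro word _
  unfold Spec_key_compiling key_compiling key_compiling_alt
  exact foldl_enumerate_eq_kcLoop word.toList 0 0 rfl
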